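-- pv_equiv track=rewrite | github.com/prography-6th-study/algorithm-code | yongmin/LV2_n진수_게임.py | solution
-- ===== SOURCE A (Python) =====
-- def conv(number, base):
--     arr = "0123456789ABCDEF"
--     q, r = divmod(number, base)
--     if q == 0:
--         return arr[r]
--     else:
--         return conv(q, base) + arr[r]
--
-- def solution(n, t, m, p):  # 진법, 구하는 수의 개수, 참가 인원, 튜브의 순서
--     digits = ""
--     number = 0
--     # digits의 길이가 구하는 수의 개수 * 참가 인원 (t*m) 보다 커질 때까지 반복
--     while len(digits) < t * m:
--         digits += conv(number, n)  # 진법변환 후 digits에 추가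
--         number += 1
--     answer = ""
--     # 구하는 수의 개수 (t) 만큼 반복
--     for i in range(t):
--         answer += digits[(p - 1) + i * m]
--     return answer
-- ===== SOURCE B (Python) =====
-- ARR = "0123456789ABCDEF"
--
--
-- def digits_of(number, n):
--     # base-n digit string of `number`, least-significant digit first, then reversed
--     ds = []
--     while True:
--         ds.append(ARR[number % n])
--         number //= n
--         if number == 0:
--             break
--     return ds[::-1]
--
--
-- def solution(n, t, m, p):
--     if t <= 0:
--         return ""
--     last = (p - 1) + (t - 1) * m   # position of the final wanted character
--     ans = []
--     target = p - 1                 # next wanted position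
--     pos = 0                        # global position in the digit stream
--     number = 0
--     while pos <= last:             # single fused pass over the digit stream
--         for ch in digits_of(number, n):
--             if pos == target and target <= last:
--                 ans.append(ch)
--                 target += m
--             pos += 1
--         number += 1
--     return ''.join(ans)
-- ===== Notes on version B (the rewrite author's own statement) =====
-- stated objective: alternative
-- what changed: A materialises the full base-n digit string (length >= t*m) and then runs a second indexing loop over it; B makes one fused streaming pass that keeps only a global position counter and the next target position (p-1, then +m), collecting each wanted character as its digit is produced, and builds digit strings iteratively (append-then-reverse) instead of A's recursive prepend.
-- outside the precondition, e.g. on solution(2, 3, 1, 2): A returns '110', B returns '110'; on solution(2, 2, 1, 0): A returns '10', B returns ''; on solution(20, 2, 2, 1): A returns '02', B returns '02'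
import Mathlib
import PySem

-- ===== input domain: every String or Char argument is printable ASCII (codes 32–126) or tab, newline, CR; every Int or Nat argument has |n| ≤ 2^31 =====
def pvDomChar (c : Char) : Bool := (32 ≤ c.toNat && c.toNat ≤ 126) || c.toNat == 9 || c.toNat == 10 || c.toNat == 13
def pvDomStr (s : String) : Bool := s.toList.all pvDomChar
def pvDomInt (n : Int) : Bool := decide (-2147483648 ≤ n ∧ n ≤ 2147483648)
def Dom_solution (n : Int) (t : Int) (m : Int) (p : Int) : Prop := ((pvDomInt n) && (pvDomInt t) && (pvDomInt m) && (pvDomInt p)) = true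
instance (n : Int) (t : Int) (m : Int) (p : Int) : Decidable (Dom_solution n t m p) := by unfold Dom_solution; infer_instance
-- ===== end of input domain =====

-- B fuses A's build-the-whole-digit-string pass and the separate indexing pass into one
-- streaming pass with a running position and next-target counter (objective: alternative).

-- ===== PORT A =====

-- arr = "0123456789ABCDEF"
def pvArr : List Char := "0123456789ABCDEF".toList

-- conv(number, base): recursive base conversion, most significant digit via recursion.
-- The fuel counter and the guard `2 ≤ base ∧ base ≤ 16 ∧ 0 ≤ number` only make the same
-- computation total: outside them Python's conv raises (base = 0, digit index out of arr's
-- range) or diverges (base = 1, negative numbers); Pre_ excludes those inputs, and the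
-- wrapper convA always supplies enough fuel (the quotient shrinks at every step).
def convAF : Nat → Int → Int → List Char
  | 0, _, _ => []
  | _ + 1, number, base =>
      if 2 ≤ base ∧ base ≤ 16 ∧ 0 ≤ number then
        match PySem.List.pyGet? pvArr (PySem.Int.mod number base) with
        | none => []          -- IndexError (unreachable under the guard)
        | some c =>
            if PySem.Int.floordiv number base = 0 then [c]
            else convAF ‹Nat› (PySem.Int.floordiv number base) base ++ [c]
      else []

def convA (number base : Int) : List Char := convAF (number.toNat + 1) number base

-- the while loop of solution: while len(digits) < t*m: digits += conv(number, n); number += 1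
-- (fuel and the `conv = []` test are totality guards only; conv never returns "" on Pre_ inputs,
-- and solution supplies fuel (t*m).toNat + 1, enough because every pass adds ≥ 1 character)
def loopA : Nat → Int → Int → List Char → Int → List Char
  | 0, _, _, digits, _ => digits
  | f + 1, n, tm, digits, number =>
      if (digits.length : Int) < tm then
        if convA number n = [] then digits
        else loopA f n tm (digits ++ convA number n) (number + 1)
      else digits

def solution (n : Int) (t : Int) (m : Int) (p : Int) : String :=
  let digits := loopA ((t * m).toNat + 1) n (t * m) [] 0
  String.ofList ((PySem.List.pyRange 0 t 1).foldl
    (fun acc i =>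
      match PySem.List.pyGet? digits ((p - 1) + i * m) with
      | some c => acc ++ [c]
      | none => acc)      -- IndexError in Python (unreachable under Pre_)
    [])

-- ===== PORT B =====

-- digits_of, loop part: ds collected least-significant digit first (appended), caller reverses.
-- Same totality guards as convAF (Python raises or diverges outside them; Pre_ excludes).
def digBF : Nat → Int → Int → List Char
  | 0, _, _ => []
  | _ + 1, number, n =>
      if 2 ≤ n ∧ n ≤ 16 ∧ 0 ≤ number then
        match PySem.List.pyGet? pvArr (PySem.Int.mod number n) with
        | none => []        -- IndexError (unreachable under the guard)
        | some c =>
            if PySem.Int.floordiv number n = 0 then [c]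
            else [c] ++ digBF ‹Nat› (PySem.Int.floordiv number n) n
      else []

def digB (number n : Int) : List Char := digBF (number.toNat + 1) number n

-- the inner `for ch in digits_of(number, n)` loop, state (ans, target, pos)
def innerB (m L : Int) : List Char → List Char → Int → Int → List Char × Int × Int
  | [], a, tg, po => (a, tg, po)
  | c :: rest, a, tg, po =>
      if po = tg ∧ tg ≤ L then innerB m L rest (a ++ [c]) (tg + m) (po + 1)
      else innerB m L rest a tg (po + 1)

-- the outer `while pos <= last` loop.  Fuel and the `= []` test are totality guards only
-- (digits_of never returns an empty chunk on Pre_ inputs, and each chunk advances pos by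
-- ≥ 1, so solution_alt's fuel (L+1).toNat + 1 is enough).
def loopB : Nat → Int → Int → Int → List Char → Int → Int → Int → List Char
  | 0, _, _, _, ans, _, _, _ => ans
  | f + 1, n, m, L, ans, tg, po, number =>
      if po ≤ L then
        if (digB number n).reverse = [] then ans
        else
          loopB f n m L (innerB m L ((digB number n).reverse) ans tg po).1
            (innerB m L ((digB number n).reverse) ans tg po).2.1
            (innerB m L ((digB number n).reverse) ans tg po).2.2 (number + 1)
      else ans

def solution_alt (n : Int) (t : Int) (m : Int) (p : Int) : String :=
  if t ≤ 0 then ""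
  else String.ofList
    (loopB (((p - 1) + (t - 1) * m + 1).toNat + 1) n m ((p - 1) + (t - 1) * m)
      [] (p - 1) 0 0)

-- ===== PRECONDITION & SPEC =====
-- Pre_ admits (a) the degenerate t ≤ 0 ∧ t*m ≤ 0 inputs, where A returns "" for every n, m, p,
-- and (b) the problem's own domain 2 ≤ n ≤ 16, t ≥ 1, m ≥ 1, 1 ≤ p ≤ m.  Outside it A raises
-- (ZeroDivisionError/IndexError) or diverges (n = 1), except for accidental returns: p outside
-- [1, m] (negative-index wraparound / overshoot of the digit string), n outside [2, 16] with a
-- small enough t*m, and t < 0 with m < 0 — all artefacts of A's materialised string, excluded.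
def Pre_solution (n : Int) (t : Int) (m : Int) (p : Int) : Prop :=
  (t ≤ 0 ∧ t * m ≤ 0) ∨ (1 ≤ t ∧ 2 ≤ n ∧ n ≤ 16 ∧ 1 ≤ m ∧ 1 ≤ p ∧ p ≤ m)
instance (n : Int) (t : Int) (m : Int) (p : Int) : Decidable (Pre_solution n t m p) := by
  unfold Pre_solution; infer_instance

def pvWitness_solution : Int × Int × Int × Int := (2, 3, 2, 1)

def Spec_solution (n : Int) (t : Int) (m : Int) (p : Int) (out : String) : Prop := out = solution_alt n t m p
instance (n : Int) (t : Int) (m : Int) (p : Int) (out : String) : Decidable (Spec_solution n t m p out) := by unfold Spec_solution; infer_instance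

-- ===== CLAIM (what is proved, stated in full; the proofs are below) =====
def Claim_equal_solution : Prop := ∀ (n : Int) (t : Int) (m : Int) (p : Int), Dom_solution n t m p → Pre_solution n t m p → Spec_solution n t m p (solution n t m p)

-- ===== LEMMAS AND PROOFS =====

-- the infinite digit stream, truncated after the numbers 0, 1, …, k-1
def S (n : Int) (k : Nat) : List Char :=
  (List.range k).flatMap (fun (j : Nat) => convA (j : Int) n)

-- the segment of the stream contributed by the numbers k, …, K-1
def Sseg (n : Int) (k K : Nat) : List Char :=
  (List.range' k (K - k)).flatMap (fun (j : Nat) => convA (j : Int) n)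

-- accumulator-free description of innerB: the collected characters and the final target
def pickP (m L : Int) : List Char → Int → Int → List Char × Int
  | [], tg, _ => ([], tg)
  | c :: r, tg, po =>
      if po = tg ∧ tg ≤ L then
        ((pickP m L r (tg + m) (po + 1)).1.cons c, (pickP m L r (tg + m) (po + 1)).2)
      else pickP m L r tg (po + 1)

theorem arr_get (r : Int) (h0 : 0 ≤ r) (h16 : r < 16) :
    ∃ c, PySem.List.pyGet? pvArr r = some c := by
  have hlen : pvArr.length = 16 := by decide
  exact ⟨pvArr[r.toNat]'(by omega),
    PySem.List.pyGet?_eq_some_getElem pvArr h0 (by omega)⟩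

theorem mod_bounds (a b : Int) (hb : 0 < b) :
    0 ≤ PySem.Int.mod a b ∧ PySem.Int.mod a b < b := by
  rw [PySem.Int.mod_eq_emod_of_pos hb]
  exact ⟨Int.emod_nonneg a (by omega), Int.emod_lt_of_pos a hb⟩

theorem conv_dec (number base : Int) (h : 2 ≤ base ∧ base ≤ 16 ∧ 0 ≤ number)
    (hq : ¬ PySem.Int.floordiv number base = 0) :
    (PySem.Int.floordiv number base).toNat < number.toNat := by
  rw [PySem.Int.floordiv_eq_ediv_of_pos (by omega)] at hq ⊢
  have h0 : 0 ≤ number / base := Int.ediv_nonneg (by omega) (by omega)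
  have h1 : number / base * base ≤ number := Int.ediv_mul_le number (by omega)
  have h2 : 1 ≤ number / base := by omega
  have h3 : number / base * 2 ≤ number / base * base := by nlinarith
  omega

theorem conv_ne_nil (number base : Int) (h : 2 ≤ base ∧ base ≤ 16 ∧ 0 ≤ number) :
    convA number base ≠ [] := by
  obtain ⟨c, hc⟩ := arr_get (PySem.Int.mod number base)
    (mod_bounds number base (by omega)).1
    (by have := (mod_bounds number base (by omega)).2; omega)
  rw [convA, convAF, if_pos h, hc]
  show (if PySem.Int.floordiv number base = 0 then [c]
        else convAF number.toNat (PySem.Int.floordiv number base) base ++ [c]) ≠ []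
  split <;> simp

theorem convF_eq_digF (base : Int) :
    ∀ (f : Nat) (number : Int), number.toNat < f →
      convAF f number base = (digBF f number base).reverse := by
  intro f
  induction f with
  | zero => intro number h; omega
  | succ f ih =>
      intro number h
      rw [convAF, digBF]
      by_cases hg : 2 ≤ base ∧ base ≤ 16 ∧ 0 ≤ number
      · rw [if_pos hg, if_pos hg]
        obtain ⟨c, hc⟩ := arr_get (PySem.Int.mod number base)
          (mod_bounds number base (by omega)).1
          (by have := (mod_bounds number base (by omega)).2; omega)
        rw [hc]
        show (if PySem.Int.floordiv number base = 0 then [c]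
              else convAF f (PySem.Int.floordiv number base) base ++ [c])
            = (if PySem.Int.floordiv number base = 0 then [c]
              else [c] ++ digBF f (PySem.Int.floordiv number base) base).reverse
        by_cases hq : PySem.Int.floordiv number base = 0
        · simp [hq]
        · have hdec := conv_dec number base hg hq
          simp [hq, ih (PySem.Int.floordiv number base) (by omega)]
      · rw [if_neg hg, if_neg hg]; rfl

theorem conv_eq_digB (number base : Int) :
    convA number base = (digB number base).reverse :=
  convF_eq_digF base (number.toNat + 1) number (by omega)

theorem S_zero (n : Int) : S n 0 = [] := rfl

theorem S_succ (n : Int) (k : Nat) : S n (k + 1) = S n k ++ convA (k : Int) n := by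
  simp [S, List.range_succ]

theorem Sseg_self (n : Int) (k : Nat) : Sseg n k k = [] := by
  simp [Sseg]

theorem Sseg_zero (n : Int) (K : Nat) : Sseg n 0 K = S n K := by
  simp [Sseg, S, List.range_eq_range']

theorem Sseg_cons (n : Int) (k K : Nat) (h : k < K) :
    Sseg n k K = convA (k : Int) n ++ Sseg n (k + 1) K := by
  rw [Sseg, show K - k = (K - (k + 1)) + 1 by omega, List.range'_succ, List.flatMap_cons, Sseg]

theorem S_split (n : Int) (K1 K2 : Nat) (h : K1 ≤ K2) :
    S n K2 = S n K1 ++ Sseg n K1 K2 := by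
  have happ := List.range'_append (s := 0) (m := K1) (n := K2 - K1) (step := 1)
  simp only [Nat.zero_add, Nat.one_mul] at happ
  rw [S, S, Sseg, ← List.flatMap_append]
  congr 1
  rw [List.range_eq_range', List.range_eq_range']
  rw [show K1 + (K2 - K1) = K2 from by omega] at happ
  exact happ.symm

-- A's while loop, started from the stream truncated at k, continues the stream until
-- its length reaches t*m (any sufficient fuel)
theorem loopA_spec (n tm : Int) (hn2 : 2 ≤ n) (hn16 : n ≤ 16) :
    ∀ (f : Nat) (k : Nat), (tm - ((S n k).length : Int)).toNat < f →
      ∃ K : Nat, loopA f n tm (S n k) (k : Int) = S n K ∧ tm ≤ ((S n K).length : Int) := by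
  intro f
  induction f with
  | zero => intro k hk; omega
  | succ f ih =>
      intro k hk
      rw [loopA]
      by_cases hcond : ((S n k).length : Int) < tm
      · rw [if_pos hcond]
        have hne : convA (k : Int) n ≠ [] := conv_ne_nil _ _ ⟨hn2, hn16, by omega⟩
        rw [if_neg hne]
        have hstep : S n k ++ convA (k : Int) n = S n (k + 1) := (S_succ n k).symm
        rw [hstep, show ((k : Int) + 1) = ((k + 1 : Nat) : Int) by push_cast; ring]
        apply ih
        have h1 : 1 ≤ (convA (k : Int) n).length := List.length_pos_iff.mpr hne
        have h2 : (S n (k + 1)).length = (S n k).length + (convA (k : Int) n).length := by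
          rw [S_succ, List.length_append]
        omega
      · rw [if_neg hcond]
        exact ⟨k, rfl, by omega⟩

-- a foldl that appends one element per item is a map
theorem foldl_eq_map_of_mem (l : List Nat) (F : List Char → Nat → List Char)
    (f : Nat → Char) (h : ∀ (acc : List Char), ∀ x ∈ l, F acc x = acc ++ [f x]) :
    ∀ acc, l.foldl F acc = acc ++ l.map f := by
  induction l with
  | nil => intro acc; simp
  | cons x xs ih =>
      intro acc
      rw [List.foldl_cons, h acc x List.mem_cons_self,
        ih (fun a y hy => h a y (List.mem_cons_of_mem x hy)) (acc ++ [f x])]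
      simp

theorem idx_bound (t m p : Int) (i : Nat) (ht : 1 ≤ t) (hm : 1 ≤ m)
    (hp1 : 1 ≤ p) (hpm : p ≤ m) (hi : (i : Int) < t) :
    0 ≤ (p - 1) + (i : Int) * m ∧ (p - 1) + (i : Int) * m ≤ (p - 1) + (t - 1) * m ∧
      (p - 1) + (t - 1) * m < t * m := by
  have him : (i : Int) * m ≤ (t - 1) * m :=
    mul_le_mul_of_nonneg_right (by omega) (by omega)
  have him0 : 0 ≤ (i : Int) * m := mul_nonneg (by positivity) (by omega)
  have hb : (t - 1) * m + m = t * m := by ring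
  revert him him0 hb
  generalize (i : Int) * m = a
  generalize (t - 1) * m = b
  generalize t * m = c
  intros
  omega

-- A's selection loop, as a map over range
theorem ansA (t m p : Int) (digits : List Char) (ht : 1 ≤ t) (hm : 1 ≤ m)
    (hp1 : 1 ≤ p) (hpm : p ≤ m) (hlen : t * m ≤ (digits.length : Int)) :
    (PySem.List.pyRange 0 t 1).foldl
      (fun acc i =>
        match PySem.List.pyGet? digits ((p - 1) + i * m) with
        | some c => acc ++ [c]
        | none => acc) []
    = (List.range t.toNat).map (fun (i : Nat) => digits.getD ((p - 1) + (i : Int) * m).toNat ' ') := by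
  rw [PySem.List.pyRange_one]
  simp only [sub_zero]
  rw [List.foldl_map]
  rw [foldl_eq_map_of_mem _ _
    (fun (i : Nat) => digits.getD ((p - 1) + (i : Int) * m).toNat ' ') ?_ []]
  · simp
  · intro acc i hi
    simp only [zero_add]
    have hi' : (i : Int) < t := by
      have := List.mem_range.mp hi; omega
    obtain ⟨hb0, hb1, hb2⟩ := idx_bound t m p i ht hm hp1 hpm hi'
    rw [PySem.List.pyGet?_eq_some_getElem digits hb0 (by omega)]
    rw [List.getD_eq_getElem digits ' ' (by omega)]

-- innerB in terms of pickP
theorem innerB_eq (m L : Int) (ds : List Char) :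
    ∀ (a : List Char) (tg po : Int),
      innerB m L ds a tg po
        = (a ++ (pickP m L ds tg po).1, (pickP m L ds tg po).2, po + ds.length) := by
  induction ds with
  | nil => intro a tg po; simp [innerB, pickP]
  | cons c rest ih =>
      intro a tg po
      simp only [innerB, pickP]
      by_cases hc : po = tg ∧ tg ≤ L
      · rw [if_pos hc, if_pos hc, ih]
        simp only [List.length_cons]
        refine Prod.ext ?_ (Prod.ext rfl ?_)
        · simp
        · push_cast; ring
      · rw [if_neg hc, if_neg hc, ih]
        refine Prod.ext rfl (Prod.ext rfl ?_)
        simp only [List.length_cons]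
        push_cast; ring

-- pickP over a concatenation
theorem pickP_append (m L : Int) (d1 d2 : List Char) :
    ∀ (tg po : Int),
      pickP m L (d1 ++ d2) tg po
        = ((pickP m L d1 tg po).1 ++ (pickP m L d2 (pickP m L d1 tg po).2 (po + d1.length)).1,
           (pickP m L d2 (pickP m L d1 tg po).2 (po + d1.length)).2) := by
  induction d1 with
  | nil => intro tg po; simp [pickP]
  | cons c rest ih =>
      intro tg po
      simp only [List.cons_append, pickP]
      by_cases hc : po = tg ∧ tg ≤ L
      · rw [if_pos hc, if_pos hc, ih]
        simp only [List.length_cons]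
        push_cast
        rw [show po + 1 + (rest.length : Int) = po + ((rest.length : Int) + 1) from by ring]
        exact Prod.ext (by simp) rfl
      · rw [if_neg hc, if_neg hc, ih]
        simp only [List.length_cons]
        push_cast
        rw [show po + 1 + (rest.length : Int) = po + ((rest.length : Int) + 1) from by ring]

-- B's outer loop, started at number k, consumes the stream from k on past position L
-- (any sufficient fuel)
theorem loopB_spec (n m L : Int) (hn2 : 2 ≤ n) (hn16 : n ≤ 16) :
    ∀ (f : Nat) (k : Nat) (ans : List Char) (tg po : Int), (L + 1 - po).toNat < f →
      ∃ K : Nat, k ≤ K ∧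
      loopB f n m L ans tg po (k : Int) = ans ++ (pickP m L (Sseg n k K) tg po).1 ∧
      L < po + ((Sseg n k K).length : Int) := by
  intro f
  induction f with
  | zero => intro k ans tg po hM; omega
  | succ f ih =>
      intro k ans tg po hM
      rw [loopB]
      by_cases hcond : po ≤ L
      · rw [if_pos hcond]
        have hne : convA (k : Int) n ≠ [] := conv_ne_nil _ _ ⟨hn2, hn16, by omega⟩
        have h1 : 1 ≤ (convA (k : Int) n).length := List.length_pos_iff.mpr hne
        rw [show (digB (k : Int) n).reverse = convA (k : Int) n from (conv_eq_digB _ _).symm]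
        rw [if_neg hne]
        rw [innerB_eq m L (convA (k : Int) n) ans tg po]
        dsimp only
        obtain ⟨K, hkK, hrec, hlen⟩ :=
          ih (k + 1) (ans ++ (pickP m L (convA (k : Int) n) tg po).1)
            (pickP m L (convA (k : Int) n) tg po).2 (po + (convA (k : Int) n).length)
            (by omega)
        have hsplit : Sseg n k K = convA (k : Int) n ++ Sseg n (k + 1) K :=
          Sseg_cons n k K (by omega)
        refine ⟨K, by omega, ?_, ?_⟩
        · rw [show ((k : Int) + 1) = ((k + 1 : Nat) : Int) by push_cast; ring, hrec]
          rw [hsplit, pickP_append]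
          simp
        · rw [hsplit, List.length_append]
          push_cast
          omega
      · rw [if_neg hcond]
        exact ⟨k, le_rfl, by simp [Sseg_self, pickP], by rw [Sseg_self]; simp; omega⟩

-- past the last admissible target, nothing is collected
theorem pick_none (m L : Int) (tg : Int) (htg : L < tg) :
    ∀ (P : List Char) (po : Int), (pickP m L P tg po).1 = [] := by
  intro P
  induction P with
  | nil => intro po; simp [pickP]
  | cons c rest ih =>
      intro po
      rw [pickP, if_neg (by omega)]
      exact ih (po + 1)

-- the crux: pickP collects exactly the characters at positions tg, tg+m, tg+2m, …,
-- read off by absolute indexing into the processed list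
theorem pick_count (m L : Int) (hm : 1 ≤ m) :
    ∀ (P : List Char) (c : Nat) (tg po : Int), po ≤ tg →
      (∀ i : Nat, i < c → tg + (i : Int) * m ≤ L ∧ tg + (i : Int) * m - po < (P.length : Int)) →
      (L < tg + (c : Int) * m) →
      (pickP m L P tg po).1
        = (List.range c).map (fun (i : Nat) => P.getD (tg + (i : Int) * m - po).toNat ' ') := by
  intro P
  induction P with
  | nil =>
      intro c tg po hpo hin hout
      match c with
      | 0 => simp [pickP]
      | c' + 1 =>
          exfalso
          have := (hin 0 (by omega)).2
          simp at this
          omega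
  | cons x P ih =>
      intro c tg po hpo hin hout
      by_cases hpt : po = tg
      · match c with
        | 0 =>
            rw [pick_none m L tg (by simpa using hout)]
            simp
        | c' + 1 =>
            have h0 := hin 0 (by omega)
            simp only [Nat.cast_zero, zero_mul, add_zero] at h0
            rw [pickP, if_pos ⟨hpt, h0.1⟩]
            dsimp only
            rw [List.range_succ_eq_map, List.map_cons, List.map_map]
            have hfirst : (x :: P).getD (tg + ((0 : Nat) : Int) * m - po).toNat ' ' = x := by
              simp [hpt]
            congr 1
            · simpa using hfirst.symm
            · rw [ih c' (tg + m) (po + 1) (by omega) ?_ ?_]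
              · apply List.map_congr_left
                intro i hi
                have him0 : 0 ≤ (i : Int) * m := mul_nonneg (by positivity) (by omega)
                show P.getD (tg + m + (i : Int) * m - (po + 1)).toNat ' '
                    = (x :: P).getD (tg + ((i.succ : Nat) : Int) * m - po).toNat ' '
                have hcast : (((i.succ : Nat) : Int)) = (i : Int) + 1 := by push_cast; ring
                rw [hcast, show ((i : Int) + 1) * m = (i : Int) * m + m by ring]
                have htn : (tg + ((i : Int) * m + m) - po).toNat
                    = (tg + m + (i : Int) * m - (po + 1)).toNat + 1 := by
                  revert him0
                  generalize (i : Int) * m = j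
                  intro _
                  omega
                rw [htn, List.getD_cons_succ]
              · intro i hic
                obtain ⟨ha, hb⟩ := hin (i + 1) (by omega)
                push_cast at ha hb
                rw [show ((i : Int) + 1) * m = (i : Int) * m + m by ring] at ha hb
                simp only [List.length_cons] at hb
                have him0 : 0 ≤ (i : Int) * m := mul_nonneg (by positivity) (by omega)
                revert ha hb him0
                generalize (i : Int) * m = j
                intros
                constructor
                · omega
                · push_cast
                  omega
              · rw [show tg + m + (c' : Int) * m = tg + ((c' : Int) + 1) * m by ring]
                have : (((c' + 1 : Nat)) : Int) = (c' : Int) + 1 := by push_cast; ring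
                rw [← this]
                exact hout
      · have hpo' : po + 1 ≤ tg := by omega
        rw [pickP, if_neg (by omega)]
        rw [ih c tg (po + 1) hpo' ?_ hout]
        · apply List.map_congr_left
          intro i hi
          have him0 : 0 ≤ (i : Int) * m := mul_nonneg (by positivity) (by omega)
          have htn : (tg + (i : Int) * m - (po + 1)).toNat + 1
              = (tg + (i : Int) * m - po).toNat := by
            revert him0
            generalize (i : Int) * m = j
            intro _
            omega
          rw [← htn, List.getD_cons_succ]
        · intro i hic
          obtain ⟨ha, hb⟩ := hin i hic
          simp only [List.length_cons] at hb
          have him0 : 0 ≤ (i : Int) * m := mul_nonneg (by positivity) (by omega)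
          refine ⟨ha, ?_⟩
          revert hb him0
          generalize (i : Int) * m = j
          intros
          push_cast at *
          omega

-- ===== VERDICT (by name: the statement is the Claim_ definition above) =====
theorem solution_spec : Claim_equal_solution := by
  unfold Claim_equal_solution
  intro n t m p hdom hpre
  unfold Spec_solution
  rcases hpre with ⟨ht, htm⟩ | ⟨ht, hn2, hn16, hm, hp1, hpm⟩
  · -- degenerate inputs: both sides return ""
    simp only [solution, solution_alt, if_pos ht]
    rw [loopA, if_neg (by simp only [List.length_nil, Nat.cast_zero]; omega)]
    rw [PySem.List.pyRange_one_eq_nil (by omega)]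
    rfl
  · -- main case
    simp only [solution, solution_alt, if_neg (by omega : ¬ t ≤ 0)]
    obtain ⟨KA, hA, hlenA⟩ :=
      loopA_spec n (t * m) hn2 hn16 ((t * m).toNat + 1) 0 (by simp only [S_zero, List.length_nil, Nat.cast_zero, sub_zero]; omega)
    have hA0 : loopA ((t * m).toNat + 1) n (t * m) [] 0 = S n KA := by
      simpa [S_zero] using hA
    rw [hA0, ansA t m p (S n KA) ht hm hp1 hpm hlenA]
    obtain ⟨KB, hKk, hB, hlenB⟩ :=
      loopB_spec n m ((p - 1) + (t - 1) * m) hn2 hn16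
        (((p - 1) + (t - 1) * m + 1).toNat + 1) 0 [] (p - 1) 0 (by omega)
    have hB0 : loopB (((p - 1) + (t - 1) * m + 1).toNat + 1) n m ((p - 1) + (t - 1) * m)
        [] (p - 1) 0 0
        = (pickP m ((p - 1) + (t - 1) * m) (S n KB) (p - 1) 0).1 := by
      simpa [Sseg_zero] using hB
    rw [Sseg_zero] at hlenB
    rw [hB0]
    rw [pick_count m ((p - 1) + (t - 1) * m) hm (S n KB) t.toNat (p - 1) 0 (by omega) ?_ ?_]
    · congr 1
      apply List.map_congr_left
      intro i hi
      have hi' : (i : Int) < t := by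
        have := List.mem_range.mp hi; omega
      obtain ⟨hb0, hb1, hb2⟩ := idx_bound t m p i ht hm hp1 hpm hi'
      simp only [sub_zero]
      have hjA : ((p - 1) + (i : Int) * m).toNat < (S n KA).length := by omega
      have hjB : ((p - 1) + (i : Int) * m).toNat < (S n KB).length := by omega
      rcases le_total KA KB with hle | hle
      · rw [S_split n KA KB hle, List.getD_append _ _ _ _ hjA]
      · rw [S_split n KB KA hle, List.getD_append _ _ _ _ hjB]
    · intro i hic
      have hi' : (i : Int) < t := by omega
      obtain ⟨hb0, hb1, hb2⟩ := idx_bound t m p i ht hm hp1 hpm hi'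
      exact ⟨by omega, by omega⟩
    · rw [Int.toNat_of_nonneg (by omega)]
      have hb : (t - 1) * m + m = t * m := by ring
      revert hb
      generalize (t - 1) * m = a
      generalize t * m = b
      intros
      omega
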